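-- pv_equiv track=rewrite | github.com/Lovelyjha/GeeksforGeeks | 2.Easy/Min_Sum_Formed_by_Digit.py | Min_Sum_formed
-- ===== SOURCE A (Python) =====
-- def Min_Sum_formed(arr,n):
--     arr.sort()
--     a=0
--     b=0
--     for i in range(n):
--         if i%2!=0:
--             a=a*10+arr[i]
--         else:
--             b=b*10+arr[i]
--     return a+b
-- ===== SOURCE B (Python) =====
-- def Min_Sum_formed(arr, n):
--     s = sorted(arr)
--     total = 0
--     w = 1
--     for i in range(n - 1, -1, -1):
--         total += s[i] * w
--         if (n - i) % 2 == 0: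
--             w *= 10
--     return total
-- ===== Notes on version B (the rewrite author's own statement) =====
-- stated objective: alternative
-- what changed: A walks the sorted digits forward, interleaving them into two Horner accumulators (a=a*10+d on odd indices, b=b*10+d on even) and returns a+b; B walks the sorted digits backward once, adding each element times an explicit place-value weight w into a single total and multiplying w by 10 every second step.
import Mathlib
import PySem

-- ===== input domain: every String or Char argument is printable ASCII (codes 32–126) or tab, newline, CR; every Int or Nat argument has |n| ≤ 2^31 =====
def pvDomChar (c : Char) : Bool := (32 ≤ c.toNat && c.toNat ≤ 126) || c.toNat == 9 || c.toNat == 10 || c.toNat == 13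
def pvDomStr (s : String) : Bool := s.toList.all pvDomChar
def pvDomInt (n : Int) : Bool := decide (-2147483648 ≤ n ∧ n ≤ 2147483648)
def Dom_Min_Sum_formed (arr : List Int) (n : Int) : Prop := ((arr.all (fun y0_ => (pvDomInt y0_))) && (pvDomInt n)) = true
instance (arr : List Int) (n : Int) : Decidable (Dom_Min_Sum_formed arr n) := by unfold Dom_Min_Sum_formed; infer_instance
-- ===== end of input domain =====

-- B replaces A's forward loop with two interleaved Horner accumulators by a single backward
-- pass that adds each sorted element times an explicit place-value weight (objective:
-- alternative — reversed traversal, one sum plus a weight instead of two shifting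
-- accumulators). A sorts arr IN PLACE while B uses sorted(); the equivalence proved is about
-- the return value only.


-- ===== PORT A =====
def Min_Sum_formed (arr : List Int) (n : Int) : Int :=
  let s := PySem.List.sorted arr (fun x => x) false
  let ab := (PySem.List.pyRange 0 n 1).foldl
    (fun (ab : Int × Int) i =>
      if PySem.Int.mod i 2 ≠ 0 then (ab.1 * 10 + PySem.List.pyGetD s i 0, ab.2)
      else (ab.1, ab.2 * 10 + PySem.List.pyGetD s i 0)) (0, 0)
  ab.1 + ab.2

-- ===== PORT B =====
def Min_Sum_formed_alt (arr : List Int) (n : Int) : Int :=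
  let s := PySem.List.sorted arr (fun x => x) false
  let tw := (PySem.List.pyRange (n - 1) (-1) (-1)).foldl
    (fun (tw : Int × Int) i =>
      let t := tw.1 + PySem.List.pyGetD s i 0 * tw.2
      if PySem.Int.mod (n - i) 2 = 0 then (t, tw.2 * 10) else (t, tw.2)) (0, 1)
  tw.1

-- ===== PRECONDITION & SPEC =====
-- Pre_ excludes exactly n > len(arr), where both Pythons raise IndexError on arr[i] / s[i].
def Pre_Min_Sum_formed (arr : List Int) (n : Int) : Prop := n ≤ (arr.length : Int)
instance (arr : List Int) (n : Int) : Decidable (Pre_Min_Sum_formed arr n) := by unfold Pre_Min_Sum_formed; infer_instance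

def pvWitness_Min_Sum_formed : List Int × Int := ([6, 8, 4, 5, 2, 3], 6)

def Spec_Min_Sum_formed (arr : List Int) (n : Int) (out : Int) : Prop := out = Min_Sum_formed_alt arr n
instance (arr : List Int) (n : Int) (out : Int) : Decidable (Spec_Min_Sum_formed arr n out) := by unfold Spec_Min_Sum_formed; infer_instance

-- ===== CLAIM (what is proved, stated in full; the proofs are below) =====
def Claim_equal_Min_Sum_formed : Prop := ∀ (arr : List Int) (n : Int), Dom_Min_Sum_formed arr n → Pre_Min_Sum_formed arr n → Spec_Min_Sum_formed arr n (Min_Sum_formed arr n)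

-- ===== LEMMAS AND PROOFS =====

-- A's loop body over Nat indices (d k = sorted-list element k, default 0).
def pvStep (d : Nat → Int) (ab : Int × Int) (k : Nat) : Int × Int :=
  if k % 2 = 1 then (ab.1 * 10 + d k, ab.2) else (ab.1, ab.2 * 10 + d k)

-- A's loop as structural recursion on the trip count.
def pvGoA (d : Nat → Int) : Nat → Int × Int
  | 0 => (0, 0)
  | m + 1 => pvStep d (pvGoA d m) m

lemma pvMod2_iff (k : Nat) : PySem.Int.mod (k : Int) 2 ≠ 0 ↔ k % 2 = 1 := by
  rw [PySem.Int.mod_eq_emod_of_pos (by norm_num)]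
  omega

lemma pvFold_eq_goA (d : Nat → Int) (m : Nat) :
    (List.range m).foldl (pvStep d) (0, 0) = pvGoA d m := by
  induction m with
  | zero => rfl
  | succ m ih => rw [List.range_succ, List.foldl_append, ih]; rfl

-- the components of A's accumulator pair, as sums over the index range
lemma pvGoA_eq_sums (d : Nat → Int) (m : Nat) :
    pvGoA d m =
      (((List.range m).map (fun k => if k % 2 = 1 then d k * 10 ^ ((m - 1 - k) / 2) else 0)).sum,
       ((List.range m).map (fun k => if k % 2 = 0 then d k * 10 ^ ((m - 1 - k) / 2) else 0)).sum) := by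
  induction m with
  | zero => rfl
  | succ m ih =>
    rw [pvGoA, ih, pvStep]
    rw [List.range_succ, List.map_append, List.map_append, List.sum_append, List.sum_append]
    by_cases hm : m % 2 = 1
    · simp only [hm, if_pos, Nat.succ_sub_one]
      have h1 : ((List.range m).map (fun k => if k % 2 = 1 then d k * 10 ^ ((m - k) / 2) else 0)).sum
          = 10 * ((List.range m).map (fun k => if k % 2 = 1 then d k * 10 ^ ((m - 1 - k) / 2) else 0)).sum := by
        rw [← List.sum_map_mul_left]
        refine congrArg _ (List.map_congr_left fun k hk => ?_)
        have hk' := List.mem_range.mp hk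
        by_cases h : k % 2 = 1
        · have : (m - k) / 2 = (m - 1 - k) / 2 + 1 := by omega
          simp [h, this, pow_succ]; ring
        · simp [h]
      have h2 : ((List.range m).map (fun k => if k % 2 = 0 then d k * 10 ^ ((m - k) / 2) else 0)).sum
          = ((List.range m).map (fun k => if k % 2 = 0 then d k * 10 ^ ((m - 1 - k) / 2) else 0)).sum := by
        refine congrArg _ (List.map_congr_left fun k hk => ?_)
        have hk' := List.mem_range.mp hk
        by_cases h : k % 2 = 0
        · have : (m - k) / 2 = (m - 1 - k) / 2 := by omega
          simp [h, this]
        · simp [h]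
      have hm0 : ¬ m % 2 = 0 := by omega
      simp [h1, h2]
      exact ⟨by simp [hm]; ring, fun h => absurd h hm0⟩
    · have hm0 : m % 2 = 0 := by omega
      simp only [hm, Nat.succ_sub_one]
      have h1 : ((List.range m).map (fun k => if k % 2 = 1 then d k * 10 ^ ((m - k) / 2) else 0)).sum
          = ((List.range m).map (fun k => if k % 2 = 1 then d k * 10 ^ ((m - 1 - k) / 2) else 0)).sum := by
        refine congrArg _ (List.map_congr_left fun k hk => ?_)
        have hk' := List.mem_range.mp hk
        by_cases h : k % 2 = 1
        · have : (m - k) / 2 = (m - 1 - k) / 2 := by omega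
          simp [h, this]
        · simp [h]
      have h2 : ((List.range m).map (fun k => if k % 2 = 0 then d k * 10 ^ ((m - k) / 2) else 0)).sum
          = 10 * ((List.range m).map (fun k => if k % 2 = 0 then d k * 10 ^ ((m - 1 - k) / 2) else 0)).sum := by
        rw [← List.sum_map_mul_left]
        refine congrArg _ (List.map_congr_left fun k hk => ?_)
        have hk' := List.mem_range.mp hk
        by_cases h : k % 2 = 0
        · have : (m - k) / 2 = (m - 1 - k) / 2 + 1 := by omega
          simp [h, this, pow_succ]; ring
        · simp [h]
      simp [h1, h2]
      exact ⟨fun h => absurd h hm, by simp [hm0]; ring⟩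

-- odd-part sum + even-part sum = plain sum
lemma pvSum_merge (d : Nat → Int) (m : Nat) (e : Nat → Nat) :
    ((List.range m).map (fun k => if k % 2 = 1 then d k * 10 ^ (e k) else 0)).sum
      + ((List.range m).map (fun k => if k % 2 = 0 then d k * 10 ^ (e k) else 0)).sum
    = ((List.range m).map (fun k => d k * 10 ^ (e k))).sum := by
  induction m with
  | zero => rfl
  | succ m ih =>
    rw [List.range_succ]
    simp only [List.map_append, List.sum_append, List.map_cons, List.map_nil, List.sum_cons,
      List.sum_nil]
    rw [← ih]
    by_cases h : m % 2 = 1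
    · have h0 : ¬ m % 2 = 0 := by omega
      simp only [if_pos h, if_neg h0]
      ring
    · have h0 : m % 2 = 0 := by omega
      simp only [if_neg h, if_pos h0]
      ring

-- B's loop body over processed count j (index visited = N-1-j); state (total, weight)
def pvStepB (d : Nat → Int) (tw : Int × Int) (j : Nat) : Int × Int :=
  let t := tw.1 + d j * tw.2
  if (j + 1) % 2 = 0 then (t, tw.2 * 10) else (t, tw.2)

-- closed form of B's backward loop: total is a weighted sum, weight is 10^(m/2)
lemma pvGoB_eq (d : Nat → Int) (m : Nat) :
    (List.range m).foldl (pvStepB d) (0, 1)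
      = (((List.range m).map (fun j => d j * 10 ^ (j / 2))).sum, 10 ^ (m / 2)) := by
  induction m with
  | zero => rfl
  | succ m ih =>
    rw [List.range_succ, List.foldl_append, ih, List.map_append, List.sum_append]
    simp only [List.foldl_cons, List.foldl_nil, List.map_cons, List.map_nil, List.sum_cons,
      List.sum_nil, pvStepB]
    by_cases h : (m + 1) % 2 = 0
    · have h1 : (m + 1) / 2 = m / 2 + 1 := by omega
      simp only [if_pos h, h1, pow_succ]
      rw [Prod.mk.injEq]
      exact ⟨by ring, rfl⟩
    · have h1 : (m + 1) / 2 = m / 2 := by omega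
      simp only [if_neg h, h1]
      rw [Prod.mk.injEq]
      exact ⟨by ring, rfl⟩

-- summing g over range m in reversed index order gives the same sum
lemma pvSum_reflect (m : Nat) : ∀ g : Nat → Int,
    ((List.range m).map (fun j => g (m - 1 - j))).sum = ((List.range m).map g).sum := by
  induction m with
  | zero => intro g; rfl
  | succ m ih =>
    intro g
    rw [List.range_succ, List.map_append, List.map_append, List.sum_append, List.sum_append]
    have hL : ((List.range m).map (fun j => g (m + 1 - 1 - j))).sum
        = ((List.range m).map (fun j => g (j + 1))).sum := by
      calc ((List.range m).map (fun j => g (m + 1 - 1 - j))).sum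
          = ((List.range m).map (fun j => g ((m - 1 - j) + 1))).sum := by
            refine congrArg _ (List.map_congr_left fun j hj => ?_)
            have := List.mem_range.mp hj
            congr 1
            omega
        _ = ((List.range m).map (fun j => g (j + 1))).sum := ih (fun k => g (k + 1))
    have hshift : ((List.range (m + 1)).map g).sum
        = g 0 + ((List.range m).map (fun j => g (j + 1))).sum := by
      rw [List.range_succ_eq_map]
      simp only [List.map_cons, List.map_map, List.sum_cons]
      rfl
    have hlast : ((List.range (m + 1)).map g).sum
        = ((List.range m).map g).sum + g m := by
      rw [List.range_succ]
      simp
    rw [hL]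
    simp only [List.map_cons, List.map_nil, List.sum_cons, List.sum_nil]
    rw [show m + 1 - 1 - m = 0 from by omega]
    omega

-- the two ports agree for every arr and n (the precondition is only about Python raising)
lemma pvPorts_eq (arr : List Int) (n : Int) :
    Min_Sum_formed arr n = Min_Sum_formed_alt arr n := by
  unfold Min_Sum_formed Min_Sum_formed_alt
  dsimp only
  set s := PySem.List.sorted arr (fun x => x) false with hs
  rcases (by omega : n ≤ 0 ∨ 0 < n) with hn | hn
  · rw [PySem.List.pyRange_one_eq_nil (by omega), PySem.List.pyRange_neg_one_eq_nil (by omega)]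
    rfl
  · set N := n.toNat with hN
    have hnN : n = (N : Int) := by omega
    have hNtop : (n - 0).toNat = N := by omega
    have hNtop' : (n - 1 - (-1)).toNat = N := by omega
    rw [PySem.List.pyRange_one, PySem.List.pyRange_neg_one, List.foldl_map, List.foldl_map,
      hNtop, hNtop']
    have hA : (List.range N).foldl
        (fun (ab : Int × Int) (k : Nat) =>
          if PySem.Int.mod ((0 : Int) + k) 2 ≠ 0 then (ab.1 * 10 + PySem.List.pyGetD s ((0:Int) + k) 0, ab.2)
          else (ab.1, ab.2 * 10 + PySem.List.pyGetD s ((0:Int) + k) 0)) (0, 0)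
        = (List.range N).foldl (pvStep (fun k => s.getD k 0)) (0, 0) := by
      refine List.foldl_ext _ _ _ (fun ab k _ => ?_)
      simp only [zero_add, PySem.List.pyGetD_natCast, pvStep]
      by_cases h : k % 2 = 1
      · rw [if_pos ((pvMod2_iff k).mpr h), if_pos h]
      · rw [if_neg (fun hc => h ((pvMod2_iff k).mp hc)), if_neg h]
    have hB : (List.range N).foldl
        (fun (tw : Int × Int) (j : Nat) =>
          let t := tw.1 + PySem.List.pyGetD s (n - 1 - (j : Int)) 0 * tw.2
          if PySem.Int.mod (n - (n - 1 - (j : Int))) 2 = 0 then (t, tw.2 * 10) else (t, tw.2))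
          (0, 1)
        = (List.range N).foldl (pvStepB (fun j => s.getD (N - 1 - j) 0)) (0, 1) := by
      refine List.foldl_ext _ _ _ (fun tw j hj => ?_)
      have hj' := List.mem_range.mp hj
      have hidx : n - 1 - (j : Int) = ((N - 1 - j : Nat) : Int) := by omega
      simp only [hidx, PySem.List.pyGetD_natCast, pvStepB,
        PySem.Int.mod_eq_emod_of_pos (show (0:Int) < 2 by norm_num)]
      rw [show n - ((N - 1 - j : Nat) : Int) = ((j + 1 : Nat) : Int) from by omega]
      by_cases h : (j + 1) % 2 = 0
      · rw [if_pos (by omega), if_pos h]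
      · rw [if_neg (by omega), if_neg h]
    rw [hA, hB, pvFold_eq_goA, pvGoA_eq_sums, pvGoB_eq,
      pvSum_merge (fun k => s.getD k 0) N (fun k => (N - 1 - k) / 2)]
    have hrefl := pvSum_reflect N (fun j => s.getD (N - 1 - j) 0 * 10 ^ (j / 2))
    rw [← hrefl]
    refine congrArg _ (List.map_congr_left fun k hk => ?_)
    have hk' := List.mem_range.mp hk
    have h1 : N - 1 - (N - 1 - k) = k := by omega
    simp only [h1]

-- ===== VERDICT (by name: the statement is the Claim_ definition above) =====
theorem Min_Sum_formed_spec : Claim_equal_Min_Sum_formed := by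
  intro arr n _ _
  unfold Spec_Min_Sum_formed
  exact pvPorts_eq arr n
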